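-- pv_equiv track=rewrite | github.com/frescigno/magpy_rv | Parameter.py | Model_Par_Creator
-- ===== SOURCE A (Python) =====
-- def Model_Par_Creator(models):
--     '''Object to create the set of parameters necessary for the chosen model.
--
--     Parameters:
--         models : string
--             Name of the implemented model.
--
--     Returns:
--         model_params: dictionary
--             Dictionary of all necessary parameters for given kernel'''
--
--
--     # Check how many models are requested
--     if isinstance(models, str):
--         models = list(models)
--     if isinstance(models, list) and len(models) == 1:
--         numb = 1
--     elif isinstance(models, list) and len(models) > 1:
--         numb = len(models)
--     else:
--         raise ValueError("Model must be a string or a list of strings")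
--
--
--     # Store the number of specific models
--     zero_mod=0
--     off_mod=0
--     kepl_mod=0
--     lintrend_mod=0
--     uncorr_mod=0
--     for model in models:
--         if model.startswith("No_Model") or model.startswith("Zero") or model.startswith("zero"):
--             zero_mod+=1
--         elif model.startswith("Offset") or model.startswith("offset"):
--             off_mod+=1
--         elif model.startswith("Kepler") or model.startswith("kepler"):
--             kepl_mod+=1
--         elif model.startswith("Lin") or model.startswith("lin"):
--             lintrend_mod+=1
--         elif model.startswith("Uncor") or model.startswith("uncor"):
--             uncorr_mod+=1
--         else:
--             raise ValueError("There is no such implemented model for {}".format(model))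
--
--     # Initialise an empty disctionary
--     model_params = {}
--
--     # Fill the disctionary with the appropriate parameters based on the models
--     # In the case of repeated models, add _numb after the name of each parameter
--     if zero_mod == 1:
--         model_params.update({'zero':'zero'})
--     if zero_mod > 1:
--         for mod in range(zero_mod):
--             model_params.update({'zero_'+str(mod):'zero'})
--
--     if off_mod == 1:
--         model_params.update({'offset':'offset'})
--     if off_mod > 1:
--         for mod in range(off_mod):
--             model_params.update({'offset_'+str(mod):'offset'})
--
--     if kepl_mod == 1:
--         model_params.update({'P':'period','K':'semi-amplitude', 'ecc':'eccentricity', 'omega':'angle of periastron', 't0':'t of periastron passage'})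
--     if kepl_mod > 1:
--         for mod in range(kepl_mod):
--             model_params.update({'P_'+str(mod):'period','K_'+str(mod):'semi-amplitude', 'ecc_'+str(mod):'eccentricity', 'omega_'+str(mod):'angle of periastron', 't0_'+str(mod):'t of periastron passage'})
--
--     if lintrend_mod == 1:
--         model_params.update({'m':'slope','c':'intercept'})
--     if lintrend_mod > 1:
--         for mod in range(lintrend_mod):
--             model_params.update({'m_'+str(mod):'slope','c_'+str(mod):'intercept'})
--
--     if uncorr_mod == 1:
--         model_params.update({'rms':'rms'})
--     if uncorr_mod > 1:
--         for mod in range(uncorr_mod):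
--             model_params.update({'rms_'+str(mod):'rms'})
--
--     return model_params
-- ===== SOURCE B (Python) =====
-- # Staged-passes rewrite: a separate validation pass, then five independent
-- # filter-count passes (the category prefix sets are mutually exclusive, so plain
-- # membership counts equal A's elif-chain counts), then one comprehension builds
-- # the whole dict at once -- no mutable counters, no incremental dict updates.
-- _CATS = [
--     (("No_Model", "Zero", "zero"), [("zero", "zero")]),
--     (("Offset", "offset"), [("offset", "offset")]),
--     (("Kepler", "kepler"), [("P", "period"), ("K", "semi-amplitude"),
--                             ("ecc", "eccentricity"), ("omega", "angle of periastron"),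
--                             ("t0", "t of periastron passage")]),
--     (("Lin", "lin"), [("m", "slope"), ("c", "intercept")]),
--     (("Uncor", "uncor"), [("rms", "rms")]),
-- ]
-- _ALL = tuple(p for ps, _ in _CATS for p in ps)
--
-- def Model_Par_Creator(models):
--     if isinstance(models, str):
--         models = list(models)
--     if not (isinstance(models, list) and len(models) >= 1):
--         raise ValueError("Model must be a string or a list of strings")
--     for model in models:
--         if not model.startswith(_ALL):
--             raise ValueError("There is no such implemented model for {}".format(model))
--     return {key: val
--             for prefixes, base in _CATS
--             for cnt in (sum(1 for m in models if m.startswith(prefixes)),)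
--             for key, val in (base if cnt == 1 else
--                              [(k + '_' + str(i), v) for i in range(cnt) for k, v in base])}
-- ===== Notes on version B (the rewrite author's own statement) =====
-- stated objective: alternative
-- what changed: Replaces A's single counting pass with five mutable counters and ten fixed fill branches by a staged design: a separate validation pass, five independent per-category filter-count passes (sound because the category prefix sets are mutually exclusive), and a single comprehension that builds the whole dict at once with no mutable state.
import Mathlib
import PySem

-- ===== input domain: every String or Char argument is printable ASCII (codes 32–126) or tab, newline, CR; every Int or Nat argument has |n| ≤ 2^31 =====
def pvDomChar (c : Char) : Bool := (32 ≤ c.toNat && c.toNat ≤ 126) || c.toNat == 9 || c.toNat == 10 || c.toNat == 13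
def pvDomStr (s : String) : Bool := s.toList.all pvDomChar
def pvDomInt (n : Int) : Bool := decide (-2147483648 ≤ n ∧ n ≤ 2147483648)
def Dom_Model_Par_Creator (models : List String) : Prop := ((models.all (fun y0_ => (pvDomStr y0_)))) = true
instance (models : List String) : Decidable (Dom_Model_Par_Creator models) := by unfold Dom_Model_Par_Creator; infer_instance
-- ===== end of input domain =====

-- B replaces A's single counting pass with five mutable counters and ten fixed fill branches by
-- a separate validation pass, five independent filter-count passes (one per category — sound because
-- the prefix sets are mutually exclusive) and one comprehension that builds the whole dict at once
-- (objective: alternative decomposition).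
-- Equivalence is about the RETURN value; on inputs where Python A raises ValueError (excluded by Pre_) the ports return an unspecified value.

-- ===== PORT A =====
-- counter loop of A: the five counters as a tuple; the final `else: raise` is unreachable under Pre_ (counts unchanged there)
def pvCountA (models : List String) : Int × Int × Int × Int × Int :=
  models.foldl (fun c model =>
    let (z, o, k, l, u) := c
    if PySem.Str.startswith model "No_Model" || PySem.Str.startswith model "Zero" || PySem.Str.startswith model "zero" then (z+1, o, k, l, u)
    else if PySem.Str.startswith model "Offset" || PySem.Str.startswith model "offset" then (z, o+1, k, l, u)
    else if PySem.Str.startswith model "Kepler" || PySem.Str.startswith model "kepler" then (z, o, k+1, l, u)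
    else if PySem.Str.startswith model "Lin" || PySem.Str.startswith model "lin" then (z, o, k, l+1, u)
    else if PySem.Str.startswith model "Uncor" || PySem.Str.startswith model "uncor" then (z, o, k, l, u+1)
    else (z, o, k, l, u)) (0, 0, 0, 0, 0)

-- dict.update here always adds FRESH keys (the fixed keys per branch are pairwise distinct and the
-- `== 1` / `> 1` guards are exclusive), so each update is exactly an append to the items list.
-- str concatenation 'k_'+str(mod) is ported on List Char (String.append is kernel-opaque); exact.
def Model_Par_Creator (models : List String) : List (String × String) :=
  let (z, o, k, l, u) := pvCountA models
  let d : List (String × String) := []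
  let d := if z == 1 then d ++ [("zero", "zero")] else d
  let d := if z > 1 then d ++ (PySem.List.pyRange 0 z 1).flatMap (fun m =>
    [(String.ofList ("zero_".toList ++ PySem.Int.toChars m), "zero")]) else d
  let d := if o == 1 then d ++ [("offset", "offset")] else d
  let d := if o > 1 then d ++ (PySem.List.pyRange 0 o 1).flatMap (fun m =>
    [(String.ofList ("offset_".toList ++ PySem.Int.toChars m), "offset")]) else d
  let d := if k == 1 then d ++ [("P", "period"), ("K", "semi-amplitude"), ("ecc", "eccentricity"),
    ("omega", "angle of periastron"), ("t0", "t of periastron passage")] else d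
  let d := if k > 1 then d ++ (PySem.List.pyRange 0 k 1).flatMap (fun m =>
    [(String.ofList ("P_".toList ++ PySem.Int.toChars m), "period"),
     (String.ofList ("K_".toList ++ PySem.Int.toChars m), "semi-amplitude"),
     (String.ofList ("ecc_".toList ++ PySem.Int.toChars m), "eccentricity"),
     (String.ofList ("omega_".toList ++ PySem.Int.toChars m), "angle of periastron"),
     (String.ofList ("t0_".toList ++ PySem.Int.toChars m), "t of periastron passage")]) else d
  let d := if l == 1 then d ++ [("m", "slope"), ("c", "intercept")] else d
  let d := if l > 1 then d ++ (PySem.List.pyRange 0 l 1).flatMap (fun m =>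
    [(String.ofList ("m_".toList ++ PySem.Int.toChars m), "slope"),
     (String.ofList ("c_".toList ++ PySem.Int.toChars m), "intercept")]) else d
  let d := if u == 1 then d ++ [("rms", "rms")] else d
  let d := if u > 1 then d ++ (PySem.List.pyRange 0 u 1).flatMap (fun m =>
    [(String.ofList ("rms_".toList ++ PySem.Int.toChars m), "rms")]) else d
  d

-- ===== PORT B =====
-- the static category table _CATS of Source B
def pvCats : List (List String × List (String × String)) :=
  [(["No_Model", "Zero", "zero"], [("zero", "zero")]),
   (["Offset", "offset"], [("offset", "offset")]),
   (["Kepler", "kepler"], [("P", "period"), ("K", "semi-amplitude"), ("ecc", "eccentricity"),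
                           ("omega", "angle of periastron"), ("t0", "t of periastron passage")]),
   (["Lin", "lin"], [("m", "slope"), ("c", "intercept")]),
   (["Uncor", "uncor"], [("rms", "rms")])]

-- Source B's validation pass only raises (no state); those inputs are excluded by Pre_, so it has no port.
-- The dict comprehension only ever produces fresh keys, so it is exactly this items list in
-- generation order; `sum(1 for m in models if m.startswith(prefixes))` is the sum of a 0/1 map;
-- `base if cnt == 1 else [...]` with `range(cnt)` is the if/else below.
def Model_Par_Creator_alt (models : List String) : List (String × String) :=
  pvCats.flatMap (fun cat =>
    let cnt : Int := (models.map (fun m => if cat.1.any (fun p => PySem.Str.startswith m p) then (1:Int) else 0)).sum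
    if cnt == 1 then cat.2
    else (PySem.List.pyRange 0 cnt 1).flatMap (fun i =>
      cat.2.map (fun kv => (String.ofList (kv.1.toList ++ "_".toList ++ PySem.Int.toChars i), kv.2))))

-- ===== PRECONDITION & SPEC =====
-- Pre_ = exactly the inputs where Python A returns: a nonempty list whose every entry starts with one
-- of the recognised model prefixes (otherwise A raises ValueError).
def Pre_Model_Par_Creator (models : List String) : Prop :=
  models ≠ [] ∧ ∀ model ∈ models,
    (PySem.Str.startswith model "No_Model" || PySem.Str.startswith model "Zero" || PySem.Str.startswith model "zero" ||
     PySem.Str.startswith model "Offset" || PySem.Str.startswith model "offset" ||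
     PySem.Str.startswith model "Kepler" || PySem.Str.startswith model "kepler" ||
     PySem.Str.startswith model "Lin" || PySem.Str.startswith model "lin" ||
     PySem.Str.startswith model "Uncor" || PySem.Str.startswith model "uncor") = true
instance (models : List String) : Decidable (Pre_Model_Par_Creator models) := by
  unfold Pre_Model_Par_Creator; infer_instance

def pvWitness_Model_Par_Creator : List String := ["Kepler", "Offset", "Kepler_2"]

def Spec_Model_Par_Creator (models : List String) (out : List (String × String)) : Prop := out = Model_Par_Creator_alt models
instance (models : List String) (out : List (String × String)) : Decidable (Spec_Model_Par_Creator models out) := by unfold Spec_Model_Par_Creator; infer_instance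

-- ===== CLAIM (what is proved, stated in full; the proofs are below) =====
def Claim_equal_Model_Par_Creator : Prop := ∀ (models : List String), Dom_Model_Par_Creator models → Pre_Model_Par_Creator models → Spec_Model_Par_Creator models (Model_Par_Creator models)

-- ===== LEMMAS AND PROOFS =====

-- "model starts with one of ps"
def pvPred (ps : List String) (m : String) : Bool := ps.any (fun p => PySem.Str.startswith m p)

-- two prefix sets none of whose members is a prefix of a member of the other can never both match
theorem pvExcl (ps qs : List String)
    (h : ∀ p ∈ ps, ∀ q ∈ qs, ¬ p.toList <+: q.toList ∧ ¬ q.toList <+: p.toList)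
    (m : String) (hp : pvPred ps m = true) : pvPred qs m = false := by
  rw [pvPred, List.any_eq_true] at hp
  obtain ⟨p, hpm, hsw⟩ := hp
  rw [pvPred, Bool.eq_false_iff]
  intro hq
  rw [List.any_eq_true] at hq
  obtain ⟨q, hqm, hswq⟩ := hq
  have h1 : p.toList <+: m.toList := (PySem.Chars.startswith_iff _ _).1 (by simpa using hsw)
  have h2 : q.toList <+: m.toList := (PySem.Chars.startswith_iff _ _).1 (by simpa using hswq)
  rcases List.prefix_or_prefix_of_prefix h1 h2 with h' | h'
  · exact (h p hpm q hqm).1 h'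
  · exact (h p hpm q hqm).2 h'

theorem pvOr3 (m a b c : String) :
    (PySem.Str.startswith m a || PySem.Str.startswith m b || PySem.Str.startswith m c) = pvPred [a, b, c] m := by
  simp [pvPred, Bool.or_assoc]

theorem pvOr2 (m a b : String) :
    (PySem.Str.startswith m a || PySem.Str.startswith m b) = pvPred [a, b] m := by
  simp [pvPred]

-- A's counter loop computes the five independent filter counts of B
theorem pvCountA_eq (models : List String) :
    pvCountA models =
      ((models.countP (pvPred ["No_Model", "Zero", "zero"]) : Int),
       (models.countP (pvPred ["Offset", "offset"]) : Int),
       (models.countP (pvPred ["Kepler", "kepler"]) : Int),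
       (models.countP (pvPred ["Lin", "lin"]) : Int),
       (models.countP (pvPred ["Uncor", "uncor"]) : Int)) := by
  suffices h : ∀ (ms : List String) (z o k l u : Int),
      ms.foldl (fun c model =>
        let (z, o, k, l, u) := c
        if PySem.Str.startswith model "No_Model" || PySem.Str.startswith model "Zero" || PySem.Str.startswith model "zero" then (z+1, o, k, l, u)
        else if PySem.Str.startswith model "Offset" || PySem.Str.startswith model "offset" then (z, o+1, k, l, u)
        else if PySem.Str.startswith model "Kepler" || PySem.Str.startswith model "kepler" then (z, o, k+1, l, u)
        else if PySem.Str.startswith model "Lin" || PySem.Str.startswith model "lin" then (z, o, k, l+1, u)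
        else if PySem.Str.startswith model "Uncor" || PySem.Str.startswith model "uncor" then (z, o, k, l, u+1)
        else (z, o, k, l, u)) (z, o, k, l, u)
      = (z + (ms.countP (pvPred ["No_Model", "Zero", "zero"]) : Int),
         o + (ms.countP (pvPred ["Offset", "offset"]) : Int),
         k + (ms.countP (pvPred ["Kepler", "kepler"]) : Int),
         l + (ms.countP (pvPred ["Lin", "lin"]) : Int),
         u + (ms.countP (pvPred ["Uncor", "uncor"]) : Int)) by
    rw [pvCountA, h]; simp
  intro ms
  induction ms with
  | nil => intro z o k l u; simp
  | cons m ms ih =>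
    intro z o k l u
    simp only [List.foldl_cons]
    rw [pvOr3 m "No_Model" "Zero" "zero", pvOr2 m "Offset" "offset",
        pvOr2 m "Kepler" "kepler", pvOr2 m "Lin" "lin", pvOr2 m "Uncor" "uncor"]
    by_cases hz : pvPred ["No_Model", "Zero", "zero"] m = true
    · have ho := pvExcl ["No_Model", "Zero", "zero"] ["Offset", "offset"] (by decide) m hz
      have hk := pvExcl ["No_Model", "Zero", "zero"] ["Kepler", "kepler"] (by decide) m hz
      have hl := pvExcl ["No_Model", "Zero", "zero"] ["Lin", "lin"] (by decide) m hz
      have hu := pvExcl ["No_Model", "Zero", "zero"] ["Uncor", "uncor"] (by decide) m hz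
      rw [if_pos hz, ih]
      simp only [List.countP_cons, hz, ho, hk, hl, hu, if_true, Prod.mk.injEq]
      push_cast; omega
    · rw [if_neg hz, Bool.not_eq_true] at *
      by_cases ho : pvPred ["Offset", "offset"] m = true
      · have hk := pvExcl ["Offset", "offset"] ["Kepler", "kepler"] (by decide) m ho
        have hl := pvExcl ["Offset", "offset"] ["Lin", "lin"] (by decide) m ho
        have hu := pvExcl ["Offset", "offset"] ["Uncor", "uncor"] (by decide) m ho
        rw [if_pos ho, ih]
        simp only [List.countP_cons, hz, ho, hk, hl, hu, if_true, Prod.mk.injEq]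
        push_cast; omega
      · rw [if_neg ho, Bool.not_eq_true] at *
        by_cases hk : pvPred ["Kepler", "kepler"] m = true
        · have hl := pvExcl ["Kepler", "kepler"] ["Lin", "lin"] (by decide) m hk
          have hu := pvExcl ["Kepler", "kepler"] ["Uncor", "uncor"] (by decide) m hk
          rw [if_pos hk, ih]
          simp only [List.countP_cons, hz, ho, hk, hl, hu, if_true, Prod.mk.injEq]
          push_cast; omega
        · rw [if_neg hk, Bool.not_eq_true] at *
          by_cases hl : pvPred ["Lin", "lin"] m = true
          · have hu := pvExcl ["Lin", "lin"] ["Uncor", "uncor"] (by decide) m hl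
            rw [if_pos hl, ih]
            simp only [List.countP_cons, hz, ho, hk, hl, hu, if_true, Prod.mk.injEq]
            push_cast; omega
          · rw [if_neg hl, Bool.not_eq_true] at *
            by_cases hu : pvPred ["Uncor", "uncor"] m = true
            · rw [if_pos hu, ih]
              simp only [List.countP_cons, hz, ho, hk, hl, hu, if_true, Prod.mk.injEq]
              push_cast; omega
            · rw [if_neg hu, Bool.not_eq_true] at *
              rw [ih]
              simp only [List.countP_cons, hz, ho, hk, hl, hu, Prod.mk.injEq]
              push_cast; omega

-- one category: A's pair of independent appends (`== 1`, then `> 1`) equals B's single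
-- if/else block appended to the accumulated dict, for a nonnegative (Nat-cast) count
theorem pvBlock (n : Nat) (d base : List (String × String)) (f g : Int → List (String × String))
    (hfg : ∀ i, f i = g i) :
    (if (n : Int) > 1 then (if (n : Int) == 1 then d ++ base else d) ++ (PySem.List.pyRange 0 n 1).flatMap f
     else (if (n : Int) == 1 then d ++ base else d))
    = d ++ (if (n : Int) == 1 then base else (PySem.List.pyRange 0 n 1).flatMap g) := by
  rw [funext hfg]
  match n with
  | 0 => simp
  | 1 => norm_num
  | (n+2) =>
    have h1 : (1:Int) < (n : Int) + 2 := by omega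
    have h2 : ¬ ((n : Int) + 2 = (1:Int)) := by omega
    push_cast
    simp [h1, h2]

-- ===== VERDICT (by name: the statement is the Claim_ definition above) =====
theorem Model_Par_Creator_spec : Claim_equal_Model_Par_Creator := by
  intro models _ _
  unfold Spec_Model_Par_Creator Model_Par_Creator Model_Par_Creator_alt
  rw [pvCountA_eq]
  simp only [pvCats, List.flatMap_cons, List.flatMap_nil, List.append_nil,
    PySem.List.sum_map_ite_one_zero, List.map_cons, List.map_nil]
  rw [pvBlock _ _ _ _ _ (fun i => rfl), pvBlock _ _ _ _ _ (fun i => rfl),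
      pvBlock _ _ _ _ _ (fun i => rfl), pvBlock _ _ _ _ _ (fun i => rfl),
      pvBlock _ _ _ _ _ (fun i => rfl)]
  unfold pvPred
  simp [List.append_assoc]
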